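-- pv_equiv track=rewrite | github.com/jkunimune/Djastiz | src/arrange_words.py | latexify
-- ===== SOURCE A (Python) =====
-- def latexify(md):
-- 	""" convert some Markdown to LaTeX """
-- 	tex = [""] # list of layers, from outer to inner
-- 	enclosing = [""] # list of enclosing characters
-- 	i = 0
-- 	while i < len(md):
-- 		token = md[i]
-- 		if token == '\\': # a backslash
-- 			i += 1 # groups with the following character
-- 			token += md[i]
-- 		elif token == '~' and i+1 < len(md) and md[i+1] == '~': # as does a tilde
-- 			i += 1 # if the next character is also a tilde
-- 			token += md[i]
-- 		elif token == ']' and i+1 < len(md) and md[i+1] == '(': # '](' is also kind of a special token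
-- 			i += 1
-- 			token += md[i]
--
-- 		if enclosing[-1] == '~~' and token == '~~': # if it's closing an earlier strikethrough
-- 			tex[-2] += '\\sout{{{}}}'.format(tex[-1]) # add the strikethrough
-- 			tex.pop()
-- 			enclosing.pop()
-- 		elif enclosing[-1] == '_' and token == '_': # if it's closing an earlier emphasis
-- 			tex[-2] += '\\textit{{{}}}'.format(tex[-1]) # add the emphasis
-- 			tex.pop()
-- 			enclosing.pop()
-- 		elif enclosing[-1] == '[' and token == ']': # if it's closing an earlier bracket
-- 			tex[-2] += '\\hyperref{{{}}}'.format(tex[-1]) # add a hyperref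
-- 			tex.pop()
-- 			enclosing.pop()
-- 		elif enclosing[-1] == '[' and token == '](': # if it's closing an earlier bracket and opening a parenthesis
-- 			tex[-2] += '\\hyperref[{{:}}]{{{}}}'.format(tex[-1]) # add a hyperref with a space for the ref
-- 			tex[-1] = ""
-- 			enclosing[-1] = '('
-- 		elif enclosing[-1] == '(' and token == ')': # if it's closing an earlier parenthesis
-- 			tex[-2] = tex[-2].replace('{:}', tex[-1].replace(r'\#','')) # fill out the hyperref
-- 			tex.pop()
-- 			enclosing.pop()
-- 		elif token[0] == '\\': # if a backslash
-- 			tex[-1] += token[1:] # ask no questions and add the next character literally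
-- 		elif token in ['#','$','%','&','{','}']: # if it's a special ascii character
-- 			tex[-1] += '\\'+token # add a backslash
-- 		elif token == "^": # use the escape sequence
-- 			tex[-1] += '\\textasciicircum{}'
-- 		elif token in ['[','~~','_']: # if it's an opening enclosure
-- 			enclosing.append(token) # note it
-- 			tex.append("")
-- 		else: # otherwise
-- 			tex[-1] += token # just add the token
-- 		i += 1
--
-- 	assert len(enclosing) == 1, "{!r} was never closed in {!r}".format(enclosing, md)
-- 	return tex[0]
-- ===== SOURCE B (Python) =====
-- def latexify(md):
-- 	""" convert some Markdown to LaTeX (recursive-descent re-implementation) """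
-- 	out, closer, i = _parse(_tokenize(md), '')
-- 	return out
--
--
-- def _tokenize(md):
-- 	""" split the Markdown into its tokens: backslash pairs, '~~', '](' and single characters """
-- 	toks = []
-- 	i = 0
-- 	while i < len(md):
-- 		t = md[i]
-- 		if t == '\\':
-- 			t += md[i+1]
-- 			i += 1
-- 		elif (t == '~' and md[i+1:i+2] == '~') or (t == ']' and md[i+1:i+2] == '('):
-- 			t += md[i+1]
-- 			i += 1
-- 		toks.append(t)
-- 		i += 1
-- 	return toks
--
--
-- def _closes(ctx, t):
-- 	""" does token t close the enclosure ctx? """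
-- 	if ctx == '[':
-- 		return t in (']', '](')
-- 	if ctx == '(':
-- 		return t == ')'
-- 	return ctx != '' and t == ctx
--
--
-- def _esc(t):
-- 	""" the LaTeX text for one ordinary token """
-- 	if t[0] == '\\':
-- 		return t[1:]
-- 	if t in ('#', '$', '%', '&', '{', '}'):
-- 		return '\\' + t
-- 	if t == '^':
-- 		return '\\textasciicircum{}'
-- 	return t
--
--
-- def _wrap(t, inner):
-- 	""" wrap a closed enclosure's content """
-- 	if t == '~~':
-- 		return '\\sout{%s}' % inner
-- 	if t == '_':
-- 		return '\\textit{%s}' % inner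
-- 	return '\\hyperref{%s}' % inner
--
--
-- def _parse(toks, ctx, i=0):
-- 	""" consume tokens from position i until the closer of ctx; return (text, closer, next position) """
-- 	out = ""
-- 	while i < len(toks):
-- 		t = toks[i]
-- 		i += 1
-- 		if _closes(ctx, t):
-- 			return out, t, i
-- 		if t in ('[', '~~', '_'):
-- 			inner, closer, i = _parse(toks, t, i)
-- 			if t == '[' and closer == '](':
-- 				ref, closer2, i = _parse(toks, '(', i)
-- 				assert closer2 == ')', "{!r} was never closed".format('(')
-- 				out = (out + '\\hyperref[{:}]{%s}' % inner).replace('{:}', ref.replace('\\#', ''))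
-- 			else:
-- 				assert closer != '', "{!r} was never closed".format(t)
-- 				out += _wrap(t, inner)
-- 		else:
-- 			out += _esc(t)
-- 	assert ctx == '', "{!r} was never closed".format(ctx)
-- 	return out, '', i
-- ===== Notes on version B (the rewrite author's own statement) =====
-- stated objective: alternative
-- what changed: Replaces A's single-loop stack machine over two parallel lists (tex layers + enclosing markers) with a recursive-descent parser: a tokenizer, then a parse(toks, ctx) function that recurses into each enclosure ('[', '~~', '_', and the '](…)' link production) and wraps the returned fragment, with no explicit stacks.
import Mathlib
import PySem

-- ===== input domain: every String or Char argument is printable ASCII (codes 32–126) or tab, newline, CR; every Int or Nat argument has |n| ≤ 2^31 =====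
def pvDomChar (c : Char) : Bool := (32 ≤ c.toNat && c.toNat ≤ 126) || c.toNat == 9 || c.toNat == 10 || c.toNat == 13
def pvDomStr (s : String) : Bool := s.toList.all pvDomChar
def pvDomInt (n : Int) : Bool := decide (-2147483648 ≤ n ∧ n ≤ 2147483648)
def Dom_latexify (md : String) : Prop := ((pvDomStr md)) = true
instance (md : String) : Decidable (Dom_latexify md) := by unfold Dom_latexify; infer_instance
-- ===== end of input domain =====

-- B replaces A's explicit tex/enclosing stack machine with a recursive-descent parser
-- over a separate token list (objective: alternative decomposition, same cost).

-- ===== PORT A =====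

-- tex[-1] += s  (Python's tex is never empty; the [] case is unreachable there)
def pvAddTop (s : String) : List String → List String
  | t :: ts => (t ++ s) :: ts
  | [] => [s]

-- the body of A's while loop after the token has been assembled: the if/elif chain,
-- acting on (tex, enclosing); stacks are kept head-innermost (Python's tail is our head).
-- The '_, _ => (tex, enc)' fallbacks are unreachable in A (the stacks always line up).
def stepA (token : String) (tex enc : List String) : List String × List String :=
  if enc.headD "" = "~~" ∧ token = "~~" then
    match tex, enc with
    | t0 :: t1 :: tr, _ :: er => ((t1 ++ "\\sout{" ++ t0 ++ "}") :: tr, er)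
    | _, _ => (tex, enc)
  else if enc.headD "" = "_" ∧ token = "_" then
    match tex, enc with
    | t0 :: t1 :: tr, _ :: er => ((t1 ++ "\\textit{" ++ t0 ++ "}") :: tr, er)
    | _, _ => (tex, enc)
  else if enc.headD "" = "[" ∧ token = "]" then
    match tex, enc with
    | t0 :: t1 :: tr, _ :: er => ((t1 ++ "\\hyperref{" ++ t0 ++ "}") :: tr, er)
    | _, _ => (tex, enc)
  else if enc.headD "" = "[" ∧ token = "](" then
    match tex, enc with
    | t0 :: t1 :: tr, _ :: er => ("" :: (t1 ++ "\\hyperref[{:}]{" ++ t0 ++ "}") :: tr, "(" :: er)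
    | _, _ => (tex, enc)
  else if enc.headD "" = "(" ∧ token = ")" then
    match tex, enc with
    | t0 :: t1 :: tr, _ :: er => ((PySem.Str.replace t1 "{:}" (PySem.Str.replace t0 "\\#" "")) :: tr, er)
    | _, _ => (tex, enc)
  else if token.toList.headD ' ' = '\\' then  -- token[0] == '\\' (token is never empty)
    (pvAddTop (String.ofList (token.toList.drop 1)) tex, enc)  -- token[1:]
  else if token = "#" ∨ token = "$" ∨ token = "%" ∨ token = "&" ∨ token = "{" ∨ token = "}" then
    (pvAddTop ("\\" ++ token) tex, enc)
  else if token = "^" then (pvAddTop "\\textasciicircum{}" tex, enc)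
  else if token = "[" ∨ token = "~~" ∨ token = "_" then ("" :: tex, token :: enc)
  else (pvAddTop token tex, enc)

-- A's while loop: assemble the token (backslash pair / '~~' / '](' / single char),
-- dispatch via stepA; at the end Python asserts len(enclosing)==1 and returns tex[0]
-- (our getLastD; the assertion failing, and md[i] past the end after a trailing
-- backslash, are AssertionError/IndexError in Python — excluded by Pre_).
def goA : List Char → List String → List String → String
  | [], tex, _ => tex.getLastD ""
  | [c], tex, enc =>
      if c = '\\' then tex.getLastD ""  -- Python: IndexError (outside Pre_)
      else (stepA (String.ofList [c]) tex enc).1.getLastD ""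
  | c :: c2 :: rest, tex, enc =>
      if c = '\\' then
        goA rest (stepA (String.ofList [c, c2]) tex enc).1 (stepA (String.ofList [c, c2]) tex enc).2
      else if c = '~' ∧ c2 = '~' then
        goA rest (stepA "~~" tex enc).1 (stepA "~~" tex enc).2
      else if c = ']' ∧ c2 = '(' then
        goA rest (stepA "](" tex enc).1 (stepA "](" tex enc).2
      else
        goA (c2 :: rest) (stepA (String.ofList [c]) tex enc).1 (stepA (String.ofList [c]) tex enc).2

def latexify (md : String) : String := goA md.toList [""] [""]

-- ===== PORT B =====

-- B._tokenize
def tokB : List Char → List String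
  | [] => []
  | [c] => if c = '\\' then ["\\"]  -- Python: IndexError (outside Pre_)
           else [String.ofList [c]]
  | c :: c2 :: rest =>
      if c = '\\' then String.ofList [c, c2] :: tokB rest
      else if (c = '~' ∧ c2 = '~') ∨ (c = ']' ∧ c2 = '(') then String.ofList [c, c2] :: tokB rest
      else String.ofList [c] :: tokB (c2 :: rest)

-- B._closes
def isCloser (ctx t : String) : Bool :=
  if ctx = "[" then t = "]" ∨ t = "]("
  else if ctx = "(" then t = ")"
  else ctx ≠ "" ∧ t = ctx

-- B's opener test  t in ('[', '~~', '_')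
def isOpener (t : String) : Bool := t = "[" ∨ t = "~~" ∨ t = "_"

-- B._esc
def escToken (t : String) : String :=
  if t.toList.headD ' ' = '\\' then String.ofList (t.toList.drop 1)  -- t[0] == '\\', t[1:]
  else if t = "#" ∨ t = "$" ∨ t = "%" ∨ t = "&" ∨ t = "{" ∨ t = "}" then "\\" ++ t
  else if t = "^" then "\\textasciicircum{}"
  else t

-- B._wrap
def wrapTok (t inner : String) : String :=
  if t = "~~" then "\\sout{" ++ inner ++ "}"
  else if t = "_" then "\\textit{" ++ inner ++ "}"
  else "\\hyperref{" ++ inner ++ "}"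

-- B._parse; the subtype bound ('no more tokens remain than were given') only makes the
-- recursion visibly terminating; Python's asserts on unclosed enclosures are outside Pre_.
def parseS : (toks : List String) → String → String → {r : String × String × List String // r.2.2.length ≤ toks.length}
  | [], _, out => ⟨(out, "", []), by simp⟩
  | t :: toks, ctx, out =>
    if isCloser ctx t then ⟨(out, t, toks), by simp⟩
    else if isOpener t then
      match parseS toks t "" with
      | ⟨(inner, closer, r1), hr1⟩ =>
        if t = "[" ∧ closer = "](" then
          match parseS r1 "(" "" with
          | ⟨(ref, _c2, r2), hr2⟩ =>
            match parseS r2 ctx (PySem.Str.replace (out ++ "\\hyperref[{:}]{" ++ inner ++ "}") "{:}" (PySem.Str.replace ref "\\#" "")) with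
            | ⟨(res, c3, r3), hr3⟩ =>
              ⟨(res, c3, r3), by simp only [List.length_cons] at *; omega⟩
        else
          match parseS r1 ctx (out ++ wrapTok t inner) with
          | ⟨(res, c3, r3), hr3⟩ =>
            ⟨(res, c3, r3), by simp only [List.length_cons] at *; omega⟩
    else
      match parseS toks ctx (out ++ escToken t) with
      | ⟨(res, c3, r3), hr3⟩ =>
        ⟨(res, c3, r3), by simp only [List.length_cons] at *; omega⟩
  termination_by toks => toks.length
  decreasing_by all_goals (simp only [List.length_cons] at *) <;> omega

def parse (toks : List String) (ctx out : String) : String × String × List String :=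
  (parseS toks ctx out).1

def latexify_alt (md : String) : String := (parse (tokB md.toList) "" "").1

-- ===== PRECONDITION & SPEC =====

-- no trailing unpaired backslash (Python: IndexError in both A and B)
def noDangling : List Char → Bool
  | [] => true
  | [c] => c ≠ '\\'
  | c :: c2 :: rest =>
      if c = '\\' then noDangling rest
      else if (c = '~' ∧ c2 = '~') ∨ (c = ']' ∧ c2 = '(') then noDangling rest
      else noDangling (c2 :: rest)

-- the effect of one token on A's enclosing stack alone
def stepE (t : String) (enc : List String) : List String :=
  if enc.headD "" = "~~" ∧ t = "~~" then enc.tail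
  else if enc.headD "" = "_" ∧ t = "_" then enc.tail
  else if enc.headD "" = "[" ∧ t = "]" then enc.tail
  else if enc.headD "" = "[" ∧ t = "](" then "(" :: enc.tail
  else if enc.headD "" = "(" ∧ t = ")" then enc.tail
  else if t = "[" ∨ t = "~~" ∨ t = "_" then t :: enc
  else enc

def stackRun : List String → List String → List String
  | [], enc => enc
  | t :: r, enc => stackRun r (stepE t enc)

-- Pre_ = exactly the inputs on which Python A returns normally: no trailing backslash
-- (IndexError) and every enclosure closed (A's final assert; B raises there too).
def Pre_latexify (md : String) : Prop :=
  noDangling md.toList = true ∧ stackRun (tokB md.toList) [""] = [""]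

instance (md : String) : Decidable (Pre_latexify md) := by unfold Pre_latexify; infer_instance

def pvWitness_latexify : String := "a_b_ ~~x~~ [l](r\\#1) \\$5\\%^"

def Spec_latexify (md : String) (out : String) : Prop := out = latexify_alt md
instance (md : String) (out : String) : Decidable (Spec_latexify md out) := by unfold Spec_latexify; infer_instance

-- ===== CLAIM (what is proved, stated in full; the proofs are below) =====
def Claim_equal_latexify : Prop := ∀ (md : String), Dom_latexify md → Pre_latexify md → Spec_latexify md (latexify md)


-- ===== LEMMAS AND PROOFS =====

-- one-step unfoldings of B's parser
theorem parse_nil (ctx out : String) : parse [] ctx out = (out, "", []) := by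
  unfold parse; rw [parseS]

theorem parse_cons (t : String) (toks : List String) (ctx out : String) :
    parse (t :: toks) ctx out =
      if isCloser ctx t then (out, t, toks)
      else if isOpener t then
        (if t = "[" ∧ (parse toks t "").2.1 = "](" then
          parse (parse (parse toks t "").2.2 "(" "").2.2 ctx
            (PySem.Str.replace (out ++ "\\hyperref[{:}]{" ++ (parse toks t "").1 ++ "}") "{:}"
              (PySem.Str.replace (parse (parse toks t "").2.2 "(" "").1 "\\#" ""))
        else parse (parse toks t "").2.2 ctx (out ++ wrapTok t (parse toks t "").1))
      else parse toks ctx (out ++ escToken t) := by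
  unfold parse
  rw [parseS]
  rcases hps : parseS toks t "" with ⟨⟨i0, c0, r0⟩, h0⟩
  rcases hps2 : parseS r0 "(" "" with ⟨⟨i2, c2, r2⟩, h2⟩
  by_cases hc : isCloser ctx t
  · simp [hc]
  · by_cases ho : isOpener t
    · by_cases hl : t = "[" ∧ c0 = "]("
      · obtain ⟨rfl, rfl⟩ := hl
        simp only [hps, hps2]
        simp [hc, isOpener]
        rw [hps2]
      · simp [hc, ho, hps, hps2, hl]
    · simp [hc, ho]

theorem parse_closer {ctx t : String} (toks : List String) (out : String)
    (h : isCloser ctx t = true) : parse (t :: toks) ctx out = (out, t, toks) := by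
  rw [parse_cons]; simp [h]

theorem parse_opener_wrap {ctx t inner closer : String} {toks r1 : List String} (out : String)
    (hc : isCloser ctx t = false) (ho : isOpener t = true)
    (h1 : parse toks t "" = (inner, closer, r1)) (hnl : ¬(t = "[" ∧ closer = "](")) :
    parse (t :: toks) ctx out = parse r1 ctx (out ++ wrapTok t inner) := by
  rw [parse_cons]; rw [h1]; simp [hc, ho]
  intro ht hcl; exact absurd ⟨ht, hcl⟩ hnl

theorem parse_opener_link {ctx inner cl2 ref : String} {toks r1 r2 : List String} (out : String)
    (hc : isCloser ctx "[" = false)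
    (h1 : parse toks "[" "" = (inner, "](", r1))
    (h2 : parse r1 "(" "" = (ref, cl2, r2)) :
    parse ("[" :: toks) ctx out =
      parse r2 ctx (PySem.Str.replace (out ++ "\\hyperref[{:}]{" ++ inner ++ "}") "{:}"
        (PySem.Str.replace ref "\\#" "")) := by
  rw [parse_cons]; rw [h1, h2]; simp [hc, isOpener]

theorem parse_other {ctx t : String} (toks : List String) (out : String)
    (hc : isCloser ctx t = false) (ho : isOpener t = false) :
    parse (t :: toks) ctx out = parse toks ctx (out ++ escToken t) := by
  rw [parse_cons]; simp [hc, ho]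

-- A's loop at the token level (proof-side view of goA)
def runA : List String → List String → List String → String
  | [], tex, _ => tex.getLastD ""
  | t :: r, tex, enc => runA r (stepA t tex enc).1 (stepA t tex enc).2

-- one-step unfoldings of A's machine
theorem runA_cons (t : String) (r tex enc : List String) :
    runA (t :: r) tex enc = runA r (stepA t tex enc).1 (stepA t tex enc).2 := rfl

theorem stackRun_cons (t : String) (r enc : List String) :
    stackRun (t :: r) enc = stackRun r (stepE t enc) := rfl

theorem isCloser_empty (t : String) : isCloser "" t = false := by simp [isCloser]

-- a non-closing, non-opening token leaves the enclosing stack alone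
theorem stepE_noop (t ctx : String) (enc : List String)
    (hc : isCloser ctx t = false) (ho : isOpener t = false) :
    stepE t (ctx :: enc) = ctx :: enc := by
  unfold stepE
  simp only [List.headD_cons, List.tail_cons]
  split_ifs with h1 h2 h3 h4 h5 h6
  · obtain ⟨rfl, rfl⟩ := h1; simp [isCloser] at hc
  · obtain ⟨rfl, rfl⟩ := h2; simp [isCloser] at hc
  · obtain ⟨rfl, rfl⟩ := h3; simp [isCloser] at hc
  · obtain ⟨rfl, rfl⟩ := h4; simp [isCloser] at hc
  · obtain ⟨rfl, rfl⟩ := h5; simp [isCloser] at hc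
  · simp [isOpener] at ho; tauto
  · rfl

-- an opening token pushes itself
theorem stepE_push (t ctx : String) (enc : List String)
    (hc : isCloser ctx t = false) (ho : isOpener t = true) :
    stepE t (ctx :: enc) = t :: ctx :: enc := by
  have ho' : t = "[" ∨ t = "~~" ∨ t = "_" := by simpa [isOpener] using ho
  unfold stepE
  simp only [List.headD_cons, List.tail_cons]
  rcases ho' with rfl | rfl | rfl
  · simp
  · have hne : ctx ≠ "~~" := by rintro rfl; simp [isCloser] at hc
    simp [hne]
  · have hne : ctx ≠ "_" := by rintro rfl; simp [isCloser] at hc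
    simp [hne]

theorem stepA_push (t : String) (tex : List String) (ctx : String) (enc : List String)
    (hc : isCloser ctx t = false) (ho : isOpener t = true) :
    stepA t tex (ctx :: enc) = ("" :: tex, t :: ctx :: enc) := by
  have ho' : t = "[" ∨ t = "~~" ∨ t = "_" := by simpa [isOpener] using ho
  unfold stepA
  simp only [List.headD_cons]
  rcases ho' with rfl | rfl | rfl
  · simp
  · have hne : ctx ≠ "~~" := by rintro rfl; simp [isCloser] at hc
    simp [hne]
  · have hne : ctx ≠ "_" := by rintro rfl; simp [isCloser] at hc
    simp [hne]

theorem stepA_else (t a : String) (texr : List String) (ctx : String) (encr : List String)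
    (hc : isCloser ctx t = false) (ho : isOpener t = false) :
    stepA t (a :: texr) (ctx :: encr) = ((a ++ escToken t) :: texr, ctx :: encr) := by
  have n1 : ¬(ctx = "~~" ∧ t = "~~") := by rintro ⟨rfl, rfl⟩; simp [isCloser] at hc
  have n2 : ¬(ctx = "_" ∧ t = "_") := by rintro ⟨rfl, rfl⟩; simp [isCloser] at hc
  have n3 : ¬(ctx = "[" ∧ t = "]") := by rintro ⟨rfl, rfl⟩; simp [isCloser] at hc
  have n4 : ¬(ctx = "[" ∧ t = "](") := by rintro ⟨rfl, rfl⟩; simp [isCloser] at hc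
  have n5 : ¬(ctx = "(" ∧ t = ")") := by rintro ⟨rfl, rfl⟩; simp [isCloser] at hc
  have n6 : ¬(t = "[" ∨ t = "~~" ∨ t = "_") := by simpa [isOpener] using ho
  unfold stepA escToken
  simp only [List.headD_cons, if_neg n1, if_neg n2, if_neg n3, if_neg n4, if_neg n5]
  split_ifs <;> simp_all [pvAddTop]

-- what closing one enclosure appends to (or does with) the layer below
def popRes (ctx text pa : String) : String :=
  if ctx = "~~" then pa ++ "\\sout{" ++ text ++ "}"
  else if ctx = "_" then pa ++ "\\textit{" ++ text ++ "}"
  else if ctx = "(" then PySem.Str.replace pa "{:}" (PySem.Str.replace text "\\#" "")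
  else pa ++ "\\hyperref{" ++ text ++ "}"

-- THE MAIN INVARIANT: running A's machine from any frame equals B's recursive parse of
-- that frame, provided the remaining tokens close every open enclosure (stackRun … = [""]).
theorem pv_main : ∀ n : Nat, ∀ toks : List String, toks.length ≤ n →
    ((∀ acc : String, stackRun toks [""] = [""] → runA toks [acc] [""] = (parse toks "" acc).1) ∧
     (∀ (ctx acc : String) (enc : List String),
        (ctx = "~~" ∨ ctx = "_" ∨ ctx = "[" ∨ ctx = "(") → enc ≠ [] →
        stackRun toks (ctx :: enc) = [""] →
        ∃ text closer rest,
          parse toks ctx acc = (text, closer, rest) ∧ rest.length < toks.length ∧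
          ((¬(ctx = "[" ∧ closer = "](") ∧ isCloser ctx closer = true ∧
              stackRun rest enc = [""] ∧
              ∀ (pa : String) (tex : List String),
                runA toks (acc :: pa :: tex) (ctx :: enc) =
                  runA rest (popRes ctx text pa :: tex) enc) ∨
           (ctx = "[" ∧ closer = "](" ∧
              stackRun rest ("(" :: enc) = [""] ∧
              ∀ (pa : String) (tex : List String),
                runA toks (acc :: pa :: tex) (ctx :: enc) =
                  runA rest ("" :: (pa ++ "\\hyperref[{:}]{" ++ text ++ "}") :: tex) ("(" :: enc))))) := by
  intro n
  induction n with
  | zero =>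
    intro toks hlen
    have htoks : toks = [] := List.eq_nil_of_length_eq_zero (Nat.le_zero.mp hlen)
    subst htoks
    constructor
    · intro acc _; simp [runA, parse_nil]
    · intro ctx acc enc hctx hne hbal
      exfalso
      simp only [stackRun, List.cons.injEq] at hbal
      rcases hctx with rfl|rfl|rfl|rfl <;> simp at hbal
  | succ n ih =>
    intro toks hlen
    match toks with
    | [] =>
      constructor
      · intro acc _; simp [runA, parse_nil]
      · intro ctx acc enc hctx hne hbal
        exfalso
        simp only [stackRun, List.cons.injEq] at hbal
        rcases hctx with rfl|rfl|rfl|rfl <;> simp at hbal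
    | t :: rest =>
      have hrest : rest.length ≤ n := by simp only [List.length_cons] at hlen; omega
      constructor
      · -- the bottom frame (Python's tex[0] / B's top-level parse)
        intro acc hbal
        have hc0 : isCloser "" t = false := isCloser_empty t
        by_cases ho : isOpener t = true
        · have ho' : t = "[" ∨ t = "~~" ∨ t = "_" := by simpa [isOpener] using ho
          have hbal' : stackRun rest (t :: [""]) = [""] := by
            have h := hbal; rw [stackRun_cons, stepE_push t "" [] hc0 ho] at h; exact h
          obtain ⟨text, closer, r1, hp1, hl1, hcase⟩ :=
            (ih rest hrest).2 t "" [""] (by tauto) (by simp) hbal'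
          rcases hcase with ⟨hnl, hic, hbal1, heq⟩ | ⟨rfl, rfl, hbal1, heq⟩
          · have hB : parse (t :: rest) "" acc = parse r1 "" (acc ++ wrapTok t text) :=
              parse_opener_wrap acc hc0 ho hp1 hnl
            have hpop : popRes t text acc = acc ++ wrapTok t text := by
              rcases ho' with rfl|rfl|rfl <;> simp [popRes, wrapTok, String.append_assoc]
            have hA : runA (t :: rest) [acc] [""] = runA r1 [acc ++ wrapTok t text] [""] := by
              rw [runA_cons, stepA_push t [acc] "" [] hc0 ho]
              have h := heq acc []
              rw [hpop] at h
              exact h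
            rw [hA, hB]
            exact (ih r1 (by omega)).1 (acc ++ wrapTok t text) hbal1
          · obtain ⟨ref, cl2, r2, hp2, hl2, hcase2⟩ :=
              (ih r1 (by omega)).2 "(" "" [""] (by tauto) (by simp) hbal1
            rcases hcase2 with ⟨_, hic2, hbal2, heq2⟩ | ⟨habs, _, _, _⟩
            · have hcl2 : cl2 = ")" := by simpa [isCloser] using hic2
              subst hcl2
              have hB := parse_opener_link acc hc0 hp1 hp2
              have hA : runA ("[" :: rest) [acc] [""] =
                  runA r2 [PySem.Str.replace (acc ++ "\\hyperref[{:}]{" ++ text ++ "}") "{:}"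
                    (PySem.Str.replace ref "\\#" "")] [""] := by
                rw [runA_cons, stepA_push "[" [acc] "" [] hc0 ho]
                rw [heq acc [], heq2 (acc ++ "\\hyperref[{:}]{" ++ text ++ "}") []]
                simp [popRes]
              rw [hA, hB]
              exact (ih r2 (by omega)).1 _ hbal2
            · exact absurd habs (by simp)
        · have ho' : isOpener t = false := by simpa using ho
          have hbal' : stackRun rest [""] = [""] := by
            have h := hbal; rw [stackRun_cons, stepE_noop t "" [] hc0 ho'] at h; exact h
          have hB := parse_other rest acc hc0 ho'
          have hA : runA (t :: rest) [acc] [""] = runA rest [acc ++ escToken t] [""] := by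
            rw [runA_cons, stepA_else t acc [] "" [] hc0 ho']
          rw [hA, hB]
          exact (ih rest hrest).1 _ hbal'
      · -- a real open frame
        intro ctx acc enc hctx hne hbal
        by_cases hcl : isCloser ctx t = true
        · refine ⟨acc, t, rest, parse_closer rest acc hcl, by simp, ?_⟩
          rcases hctx with rfl|rfl|rfl|rfl
          · have ht : t = "~~" := by simpa [isCloser] using hcl
            subst ht
            left
            refine ⟨by simp, hcl, ?_, ?_⟩
            · have h := hbal; rw [stackRun_cons] at h; simpa [stepE] using h
            · intro pa tex; rw [runA_cons]; simp [stepA, popRes]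
          · have ht : t = "_" := by simpa [isCloser] using hcl
            subst ht
            left
            refine ⟨by simp, hcl, ?_, ?_⟩
            · have h := hbal; rw [stackRun_cons] at h; simpa [stepE] using h
            · intro pa tex; rw [runA_cons]; simp [stepA, popRes]
          · have ht : t = "]" ∨ t = "](" := by simpa [isCloser] using hcl
            rcases ht with rfl|rfl
            · left
              refine ⟨by simp, hcl, ?_, ?_⟩
              · have h := hbal; rw [stackRun_cons] at h; simpa [stepE] using h
              · intro pa tex; rw [runA_cons]; simp [stepA, popRes]
            · right
              refine ⟨rfl, rfl, ?_, ?_⟩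
              · have h := hbal; rw [stackRun_cons] at h; simpa [stepE] using h
              · intro pa tex; rw [runA_cons]; simp [stepA]
          · have ht : t = ")" := by simpa [isCloser] using hcl
            subst ht
            left
            refine ⟨by simp, hcl, ?_, ?_⟩
            · have h := hbal; rw [stackRun_cons] at h; simpa [stepE] using h
            · intro pa tex; rw [runA_cons]; simp [stepA, popRes]
        · have hcl' : isCloser ctx t = false := by simpa using hcl
          by_cases ho : isOpener t = true
          · have hbal' : stackRun rest (t :: ctx :: enc) = [""] := by
              have h := hbal; rw [stackRun_cons, stepE_push t ctx enc hcl' ho] at h; exact h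
            have ho' : t = "[" ∨ t = "~~" ∨ t = "_" := by simpa [isOpener] using ho
            obtain ⟨text1, c1, r1, hp1, hl1, hcase1⟩ :=
              (ih rest hrest).2 t "" (ctx :: enc) (by tauto) (by simp) hbal'
            rcases hcase1 with ⟨hnl, hic1, hbal1, heq1⟩ | ⟨rfl, rfl, hbal1, heq1⟩
            · obtain ⟨text2, c2, r2, hp2, hl2, hcase2⟩ :=
                (ih r1 (by omega)).2 ctx (acc ++ wrapTok t text1) enc hctx hne hbal1
              have hpop : popRes t text1 acc = acc ++ wrapTok t text1 := by
                rcases ho' with rfl|rfl|rfl <;> simp [popRes, wrapTok, String.append_assoc]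
              refine ⟨text2, c2, r2, ?_, by simp only [List.length_cons]; omega, ?_⟩
              · rw [parse_opener_wrap acc hcl' ho hp1 hnl]; exact hp2
              · have prefixEq : ∀ (pa : String) (tex : List String),
                    runA (t :: rest) (acc :: pa :: tex) (ctx :: enc) =
                      runA r1 ((acc ++ wrapTok t text1) :: pa :: tex) (ctx :: enc) := by
                  intro pa tex
                  rw [runA_cons, stepA_push t (acc :: pa :: tex) ctx enc hcl' ho]
                  have h := heq1 acc (pa :: tex)
                  rw [hpop] at h
                  exact h
                rcases hcase2 with ⟨a1,a2,a3,a4⟩ | ⟨b1,b2,b3,b4⟩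
                · exact Or.inl ⟨a1, a2, a3, fun pa tex => (prefixEq pa tex).trans (a4 pa tex)⟩
                · exact Or.inr ⟨b1, b2, b3, fun pa tex => (prefixEq pa tex).trans (b4 pa tex)⟩
            · obtain ⟨ref, cl2, r2, hp2, hl2, hcase2⟩ :=
                (ih r1 (by omega)).2 "(" "" (ctx :: enc) (by tauto) (by simp) hbal1
              rcases hcase2 with ⟨_, hic2, hbal2, heq2⟩ | ⟨habs, _, _, _⟩
              · have hcl2 : cl2 = ")" := by simpa [isCloser] using hic2
                subst hcl2
                obtain ⟨text3, c3, r3, hp3, hl3, hcase3⟩ :=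
                  (ih r2 (by omega)).2 ctx
                    (PySem.Str.replace (acc ++ "\\hyperref[{:}]{" ++ text1 ++ "}") "{:}"
                      (PySem.Str.replace ref "\\#" "")) enc hctx hne hbal2
                refine ⟨text3, c3, r3, ?_, by simp only [List.length_cons]; omega, ?_⟩
                · rw [parse_opener_link acc hcl' hp1 hp2]; exact hp3
                · have prefixEq : ∀ (pa : String) (tex : List String),
                      runA ("[" :: rest) (acc :: pa :: tex) (ctx :: enc) =
                        runA r2 (PySem.Str.replace (acc ++ "\\hyperref[{:}]{" ++ text1 ++ "}") "{:}"
                          (PySem.Str.replace ref "\\#" "") :: pa :: tex) (ctx :: enc) := by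
                    intro pa tex
                    rw [runA_cons, stepA_push "[" (acc :: pa :: tex) ctx enc hcl' ho]
                    rw [heq1 acc (pa :: tex), heq2 (acc ++ "\\hyperref[{:}]{" ++ text1 ++ "}") (pa :: tex)]
                    simp [popRes]
                  rcases hcase3 with ⟨a1,a2,a3,a4⟩ | ⟨b1,b2,b3,b4⟩
                  · exact Or.inl ⟨a1, a2, a3, fun pa tex => (prefixEq pa tex).trans (a4 pa tex)⟩
                  · exact Or.inr ⟨b1, b2, b3, fun pa tex => (prefixEq pa tex).trans (b4 pa tex)⟩
              · exact absurd habs (by simp)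
          · have ho' : isOpener t = false := by simpa using ho
            have hbal' : stackRun rest (ctx :: enc) = [""] := by
              have h := hbal; rw [stackRun_cons, stepE_noop t ctx enc hcl' ho'] at h; exact h
            obtain ⟨text2, c2, r2, hp2, hl2, hcase2⟩ :=
              (ih rest hrest).2 ctx (acc ++ escToken t) enc hctx hne hbal'
            refine ⟨text2, c2, r2, ?_, by simp only [List.length_cons]; omega, ?_⟩
            · rw [parse_other rest acc hcl' ho']; exact hp2
            · have prefixEq : ∀ (pa : String) (tex : List String),
                  runA (t :: rest) (acc :: pa :: tex) (ctx :: enc) =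
                    runA rest ((acc ++ escToken t) :: pa :: tex) (ctx :: enc) := by
                intro pa tex
                rw [runA_cons, stepA_else t acc (pa :: tex) ctx enc hcl' ho']
              rcases hcase2 with ⟨a1,a2,a3,a4⟩ | ⟨b1,b2,b3,b4⟩
              · exact Or.inl ⟨a1, a2, a3, fun pa tex => (prefixEq pa tex).trans (a4 pa tex)⟩
              · exact Or.inr ⟨b1, b2, b3, fun pa tex => (prefixEq pa tex).trans (b4 pa tex)⟩

-- the A port over characters equals the token-level machine on B's token list
theorem getLastD_pvAddTop_empty (tex : List String) :
    (pvAddTop "" tex).getLastD "" = tex.getLastD "" := by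
  cases tex with
  | nil => rfl
  | cons a l =>
    cases l with
    | nil => simp [pvAddTop]
    | cons b l2 => simp [pvAddTop]

theorem goA_eq : ∀ n : Nat, ∀ cs : List Char, cs.length ≤ n → ∀ tex enc : List String,
    goA cs tex enc = runA (tokB cs) tex enc := by
  intro n
  induction n with
  | zero =>
    intro cs h tex enc
    have : cs = [] := List.eq_nil_of_length_eq_zero (Nat.le_zero.mp h)
    subst this; rfl
  | succ n ih =>
    intro cs h tex enc
    match cs with
    | [] => rfl
    | [c] =>
      by_cases hb : c = '\\'
      · subst hb
        have hL : goA ['\\'] tex enc = tex.getLastD "" := by simp [goA]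
        have hR : tokB ['\\'] = ["\\"] := by simp [tokB]
        rw [hL, hR, runA_cons]
        have hstep : stepA "\\" tex enc = (pvAddTop "" tex, enc) := by simp [stepA]
        rw [hstep]
        exact (getLastD_pvAddTop_empty tex).symm
      · have hL : goA [c] tex enc = (stepA (String.ofList [c]) tex enc).1.getLastD "" := by
          simp [goA, hb]
        have hR : tokB [c] = [String.ofList [c]] := by simp [tokB, hb]
        rw [hL, hR, runA_cons]
        rfl
    | c :: c2 :: rest =>
      have hr : rest.length ≤ n := by simp only [List.length_cons] at h; omega
      have hr2 : (c2 :: rest).length ≤ n := by simp only [List.length_cons] at h ⊢; omega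
      by_cases hb : c = '\\'
      · subst hb
        have hL : goA ('\\' :: c2 :: rest) tex enc =
            goA rest (stepA (String.ofList ['\\', c2]) tex enc).1
              (stepA (String.ofList ['\\', c2]) tex enc).2 := by simp [goA]
        have hR : tokB ('\\' :: c2 :: rest) = String.ofList ['\\', c2] :: tokB rest := by
          simp [tokB]
        rw [hL, hR, runA_cons]
        exact ih rest hr _ _
      · by_cases h1 : c = '~' ∧ c2 = '~'
        · obtain ⟨rfl, rfl⟩ := h1
          have hL : goA ('~' :: '~' :: rest) tex enc =
              goA rest (stepA "~~" tex enc).1 (stepA "~~" tex enc).2 := by simp [goA]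
          have hR : tokB ('~' :: '~' :: rest) = "~~" :: tokB rest := by simp [tokB]
          rw [hL, hR, runA_cons]
          exact ih rest hr _ _
        · by_cases h2 : c = ']' ∧ c2 = '('
          · obtain ⟨rfl, rfl⟩ := h2
            have hL : goA (']' :: '(' :: rest) tex enc =
                goA rest (stepA "](" tex enc).1 (stepA "](" tex enc).2 := by simp [goA]
            have hR : tokB (']' :: '(' :: rest) = "](" :: tokB rest := by simp [tokB]
            rw [hL, hR, runA_cons]
            exact ih rest hr _ _
          · have hL : goA (c :: c2 :: rest) tex enc =
                goA (c2 :: rest) (stepA (String.ofList [c]) tex enc).1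
                  (stepA (String.ofList [c]) tex enc).2 := by simp [goA, hb, h1, h2]
            have hR : tokB (c :: c2 :: rest) = String.ofList [c] :: tokB (c2 :: rest) := by
              simp [tokB, hb, h1, h2]
            rw [hL, hR, runA_cons]
            exact ih (c2 :: rest) hr2 _ _

-- ===== VERDICT (by name: the statement is the Claim_ definition above) =====
theorem latexify_spec : Claim_equal_latexify := by
  unfold Claim_equal_latexify
  intro md _hdom hpre
  unfold Spec_latexify
  obtain ⟨-, hbal⟩ := hpre
  unfold latexify latexify_alt
  rw [goA_eq md.toList.length md.toList le_rfl [""] [""]]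
  exact (pv_main (tokB md.toList).length (tokB md.toList) le_rfl).1 "" hbal
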